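-- pv_equiv track=rewrite | github.com/victorsemenov1980/Coding-challenges | rangeExtraction.py | solution
-- ===== SOURCE A (Python) =====
-- def solution(args):
--     out=''
--     if len(args)==2:
--         out+=str(args[0])
--         out+=','
--         out+=str(args[1])
--     else:
--         if len(args)==3:
--             if args[1]==args[0]+1 and args[2]==args[0]+2:
--                 out+=str(args[0])
--                 out+='-'
--                 out+=str(args[2])
--             else:
--                 out+=str(args[0])
--                 out+=','
--                 out+=str(args[1])
--                 out+=','
--                 out+=str(args[2])
--         else:
--             for i in range(len(args)):
--
--                 if i==len(args)-1:
--                     out+=str(args[i])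
--
--                 else:
--                     if args[i+1]!=args[i]+1:
--                         out+=str(args[i])
--                         out+=','
--
--
--
--                     elif len(out)>0 and out[-1]=='-':
--                         pass
--                     else:
--                         if i==len(args)-2:
--                             if out[-1]==',':
--                                 out+=str(args[i])
--                                 out+=','
--                             elif out[-1]=='-':
--                                 out+=str(args[i])
--                         else:
--                             if args[i+2]==args[i]+2:
--                                 out+=str(args[i])
--                                 out+='-'
--
--                             else:
--                                 out+=str(args[i])
--                                 out+=','
--
--     return out
-- ===== SOURCE B (Python) =====
-- def solution(args):
--     segs = []
--     i, n = 0, len(args)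
--     while i < n:
--         j = i + 1
--         while j < n and args[j] == args[j - 1] + 1:
--             j += 1
--         if j - i >= 3:
--             segs.append(str(args[i]) + '-' + str(args[j - 1]))
--         else:
--             segs.extend(str(args[k]) for k in range(i, j))
--         i = j
--     return ','.join(segs)
-- ===== Notes on version B (the rewrite author's own statement) =====
-- stated objective: simpler
-- what changed: A's single index-peeking pass (with branches on the last emitted character of the output string and special-cased lengths 2 and 3) is replaced by a two-phase pipeline: group the list into maximal consecutive runs, format each run ('s-e' for runs of length >= 3, the elements themselves otherwise), and join with commas.
import Mathlib
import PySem

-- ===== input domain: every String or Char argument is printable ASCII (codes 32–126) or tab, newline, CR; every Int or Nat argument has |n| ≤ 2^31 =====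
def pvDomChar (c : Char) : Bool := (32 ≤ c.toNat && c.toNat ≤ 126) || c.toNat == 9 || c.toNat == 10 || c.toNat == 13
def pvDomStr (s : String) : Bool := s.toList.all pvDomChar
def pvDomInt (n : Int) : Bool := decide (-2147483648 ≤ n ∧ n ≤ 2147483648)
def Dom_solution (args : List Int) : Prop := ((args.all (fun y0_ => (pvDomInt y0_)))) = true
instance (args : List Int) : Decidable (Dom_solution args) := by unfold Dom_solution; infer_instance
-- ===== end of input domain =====

-- B re-implements A's single index-peeking pass as a simpler group-into-runs-then-format pipeline; return values are proved identical.

-- ===== PORT A =====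
-- body of A's 'for i in range(len(args))' loop (the general, non-2/3-length branch);
-- out is the accumulated string as List Char. The 'out[-1]' read in the i==n-2 branch is
-- guarded by a match ('none => out'): Python reaches that read only with out nonempty.
def solutionBody (args : List Int) (n : Int) (out : List Char) (i : Int) : List Char :=
  if i = n - 1 then
    out ++ PySem.Int.toChars (PySem.List.pyGetD args i 0)
  else if PySem.List.pyGetD args (i + 1) 0 ≠ PySem.List.pyGetD args i 0 + 1 then
    out ++ PySem.Int.toChars (PySem.List.pyGetD args i 0) ++ [',']
  else if 0 < out.length ∧ PySem.List.pyGet? out (-1) = some '-' then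
    out
  else if i = n - 2 then
    match PySem.List.pyGet? out (-1) with
    | some c =>
        if c = ',' then out ++ PySem.Int.toChars (PySem.List.pyGetD args i 0) ++ [',']
        else if c = '-' then out ++ PySem.Int.toChars (PySem.List.pyGetD args i 0)
        else out
    | none => out
  else if PySem.List.pyGetD args (i + 2) 0 = PySem.List.pyGetD args i 0 + 2 then
    out ++ PySem.Int.toChars (PySem.List.pyGetD args i 0) ++ ['-']
  else
    out ++ PySem.Int.toChars (PySem.List.pyGetD args i 0) ++ [',']

def solution (args : List Int) : String :=
  let n : Int := PySem.List.len args
  String.ofList <|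
    if n = 2 then
      PySem.Int.toChars (PySem.List.pyGetD args 0 0) ++ [','] ++
        PySem.Int.toChars (PySem.List.pyGetD args 1 0)
    else if n = 3 then
      if PySem.List.pyGetD args 1 0 = PySem.List.pyGetD args 0 0 + 1 ∧
         PySem.List.pyGetD args 2 0 = PySem.List.pyGetD args 0 0 + 2 then
        PySem.Int.toChars (PySem.List.pyGetD args 0 0) ++ ['-'] ++
          PySem.Int.toChars (PySem.List.pyGetD args 2 0)
      else
        PySem.Int.toChars (PySem.List.pyGetD args 0 0) ++ [','] ++
          PySem.Int.toChars (PySem.List.pyGetD args 1 0) ++ [','] ++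
          PySem.Int.toChars (PySem.List.pyGetD args 2 0)
    else
      (PySem.List.pyRange 0 n 1).foldl (solutionBody args n) []

-- ===== PORT B =====
-- B's inner while loop 'while j < n and args[j] == args[j-1] + 1: j += 1' as structural
-- recursion on the suffix after position i: returns (rest of the current run, remainder).
def runSplit (x : Int) : List Int → List Int × List Int
  | [] => ([], [])
  | y :: t =>
      if y = x + 1 then
        let p := runSplit y t
        (y :: p.1, p.2)
      else ([], y :: t)

-- used by segsB's termination
theorem runSplit_snd_length (x : Int) (t : List Int) : (runSplit x t).2.length ≤ t.length := by
  induction t generalizing x with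
  | nil => simp [runSplit]
  | cons y t ih =>
      by_cases h : y = x + 1 <;> simp [runSplit, h]
      exact Nat.le_succ_of_le (ih _)

-- B's outer while loop: one segment (or run of singleton segments) per maximal run.
def segsB : List Int → List (List Char)
  | [] => []
  | x :: t =>
      let p := runSplit x t
      (if 3 ≤ p.1.length + 1 then
        [PySem.Int.toChars x ++ ['-'] ++
          PySem.Int.toChars ((x :: p.1).getLast (List.cons_ne_nil _ _))]
      else
        (x :: p.1).map PySem.Int.toChars) ++ segsB p.2
  termination_by l => l.length
  decreasing_by
    simpa using Nat.lt_succ_of_le (runSplit_snd_length x t)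

def solution_alt (args : List Int) : String :=
  String.ofList (PySem.Chars.join [','] (segsB args))

-- ===== PRECONDITION & SPEC =====
def Spec_solution (args : List Int) (out : String) : Prop := out = solution_alt args
instance (args : List Int) (out : String) : Decidable (Spec_solution args out) := by unfold Spec_solution; infer_instance

-- ===== CLAIM (what is proved, stated in full; the proofs are below) =====
def Claim_equal_solution : Prop := ∀ (args : List Int), Dom_solution args → Spec_solution args (solution args)

-- ===== LEMMAS AND PROOFS =====

-- A's general loop, rephrased as structural recursion on the remaining suffix:
-- the Bool flag says whether out currently ends in '-' (A's "inside a range" state).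
def emitA : List Int → Bool → List Char
  | [], _ => []
  | [x], _ => PySem.Int.toChars x
  | x :: y :: t, r =>
      if y ≠ x + 1 then PySem.Int.toChars x ++ [','] ++ emitA (y :: t) false
      else if r then emitA (y :: t) r
      else
        match t with
        | [] => PySem.Int.toChars x ++ [','] ++ PySem.Int.toChars y
        | z :: _ =>
            if z = x + 2 then PySem.Int.toChars x ++ ['-'] ++ emitA (y :: t) true
            else PySem.Int.toChars x ++ [','] ++ emitA (y :: t) false

def commaTail (rem : List Int) : List Char :=
  if rem = [] then [] else [','] ++ emitA rem false

-- last element of the run x :: r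
def lastD : Int → List Int → Int
  | x, [] => x
  | _, y :: t => lastD y t

-- x :: r is a chain of consecutive integers
def isRun : Int → List Int → Prop
  | _, [] => True
  | x, y :: t => y = x + 1 ∧ isRun y t

-- B's formatting of one maximal run x :: r
def fmtB (x : Int) (r : List Int) : List Char :=
  if 3 ≤ r.length + 1 then
    PySem.Int.toChars x ++ ['-'] ++ PySem.Int.toChars (lastD x r)
  else PySem.Chars.join [','] ((x :: r).map PySem.Int.toChars)

lemma getLast_eq_lastD : ∀ (r : List Int) (x : Int) (h : x :: r ≠ []),
    (x :: r).getLast h = lastD x r := by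
  intro r
  induction r with
  | nil => intro x h; rfl
  | cons y t ih => intro x h; rw [List.getLast_cons (List.cons_ne_nil _ _), ih]; rfl

lemma runSplit_append (x : Int) (t : List Int) :
    t = (runSplit x t).1 ++ (runSplit x t).2 := by
  induction t generalizing x with
  | nil => simp [runSplit]
  | cons y t ih =>
      by_cases h : y = x + 1
      · simp only [runSplit, if_pos h]
        simpa using ih y
      · simp [runSplit, h]

lemma runSplit_chain (x : Int) (t : List Int) : isRun x (runSplit x t).1 := by
  induction t generalizing x with
  | nil => simp [runSplit, isRun]
  | cons y t ih =>
      by_cases h : y = x + 1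
      · simp only [runSplit, if_pos h]
        exact ⟨h, ih y⟩
      · simp [runSplit, h, isRun]

lemma runSplit_boundary (x : Int) (t : List Int) (w : Int) (l : List Int)
    (h : (runSplit x t).2 = w :: l) : w ≠ lastD x (runSplit x t).1 + 1 := by
  induction t generalizing x with
  | nil => simp [runSplit] at h
  | cons y t ih =>
      by_cases hy : y = x + 1
      · simp only [runSplit, if_pos hy] at h ⊢
        simpa [lastD] using ih y h
      · simp only [runSplit, if_neg hy] at h ⊢
        obtain ⟨rfl, rfl⟩ := by simpa using h
        simpa [lastD] using hy

lemma emitT (r : List Int) : ∀ (x : Int) (rem : List Int),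
    isRun x r →
    (∀ w l, rem = w :: l → w ≠ lastD x r + 1) →
    emitA (x :: (r ++ rem)) true =
      PySem.Int.toChars (lastD x r) ++ commaTail rem := by
  induction r with
  | nil =>
      intro x rem _ hb
      cases rem with
      | nil => simp [emitA, commaTail, lastD]
      | cons w l =>
          have hw : w ≠ x + 1 := by simpa [lastD] using hb w l rfl
          simp [emitA, commaTail, lastD, hw]
  | cons y r ih =>
      intro x rem hc hb
      obtain ⟨hy, hc'⟩ := hc
      subst hy
      have := ih (x + 1) rem hc' (by simpa [lastD] using hb)
      simpa [emitA, lastD] using this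

lemma emitF (x : Int) (r rem : List Int)
    (hc : isRun x r)
    (hb : ∀ w l, rem = w :: l → w ≠ lastD x r + 1) :
    emitA (x :: (r ++ rem)) false = fmtB x r ++ commaTail rem := by
  cases r with
  | nil =>
      cases rem with
      | nil => simp [emitA, fmtB, commaTail, PySem.Chars.join, List.intercalate]
      | cons w l =>
          have hw : ¬ w = x + 1 := by simpa [lastD] using hb w l rfl
          simp [emitA, fmtB, commaTail, PySem.Chars.join, List.intercalate, hw]
  | cons y r' =>
      obtain ⟨hy, hc'⟩ := hc
      subst hy
      cases r' with
      | nil =>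
          cases rem with
          | nil =>
              simp [emitA, fmtB, commaTail, PySem.Chars.join, List.intercalate,
                List.intersperse]
          | cons w l =>
              have hw : ¬ w = x + 1 + 1 := by simpa [lastD] using hb w l rfl
              have hw' : ¬ w = x + 2 := by omega
              simp [emitA, fmtB, commaTail, PySem.Chars.join, List.intercalate,
                List.intersperse, hw, hw']
      | cons z r'' =>
          obtain ⟨hz, hc''⟩ := hc'
          subst hz
          have hrun : isRun (x + 1) ((x + 1 + 1) :: r'') := by
            exact (⟨rfl, hc''⟩ : (x + 1 + 1 = x + 1 + 1) ∧ isRun (x + 1 + 1) r'')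
          have hT := emitT ((x + 1 + 1) :: r'') (x + 1) rem hrun
            (by simpa [lastD] using hb)
          have h22 : x + 1 + 1 = x + 2 := by ring
          have hstep : emitA (x :: (((x + 1) :: (x + 1 + 1) :: r'') ++ rem)) false
              = PySem.Int.toChars x ++ ['-']
                ++ emitA ((x + 1) :: (((x + 1 + 1) :: r'') ++ rem)) true := by
            simp [emitA, h22]
          rw [hstep, hT, fmtB, if_pos (by simp only [List.length_cons]; omega)]
          simp [lastD]

lemma join_cons_cons (a b : List Char) (l : List (List Char)) :
    PySem.Chars.join [','] (a :: b :: l) = a ++ [','] ++ PySem.Chars.join [','] (b :: l) := by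
  simp [PySem.Chars.join, List.intercalate, List.intersperse]

lemma join_singleton (a : List Char) : PySem.Chars.join [','] [a] = a := by
  simp [PySem.Chars.join, List.intercalate]

lemma join_append_ne_nil (l1 l2 : List (List Char)) (h1 : l1 ≠ []) (h2 : l2 ≠ []) :
    PySem.Chars.join [','] (l1 ++ l2)
      = PySem.Chars.join [','] l1 ++ [','] ++ PySem.Chars.join [','] l2 := by
  induction l1 with
  | nil => simp at h1
  | cons a l1 ih =>
      cases l1 with
      | nil =>
          cases l2 with
          | nil => simp at h2
          | cons b l2 => simp [join_cons_cons]
      | cons a' l1' =>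
          simp only [List.cons_append] at ih ⊢
          rw [join_cons_cons, ih (List.cons_ne_nil _ _), join_cons_cons]
          simp

lemma segsB_ne_nil (xs : List Int) (h : xs ≠ []) : segsB xs ≠ [] := by
  cases xs with
  | nil => simp at h
  | cons x t =>
      rw [segsB]
      split <;> simp

lemma join_seg (x : Int) (r : List Int) :
    PySem.Chars.join [',']
        (if 3 ≤ r.length + 1 then
          [PySem.Int.toChars x ++ ['-'] ++
            PySem.Int.toChars ((x :: r).getLast (List.cons_ne_nil _ _))]
        else (x :: r).map PySem.Int.toChars)
      = fmtB x r := by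
  rw [fmtB]
  split
  · rw [join_singleton, getLast_eq_lastD]
  · rfl

lemma join_segsB : ∀ (N : Nat) (xs : List Int), xs.length ≤ N →
    PySem.Chars.join [','] (segsB xs) = emitA xs false := by
  intro N
  induction N with
  | zero =>
      intro xs h
      have : xs = [] := List.eq_nil_of_length_eq_zero (Nat.le_zero.mp h)
      subst this
      simp [segsB, emitA, PySem.Chars.join, List.intercalate]
  | succ N ih =>
      intro xs h
      cases xs with
      | nil => simp [segsB, emitA, PySem.Chars.join, List.intercalate]
      | cons x t =>
          have hsplit := runSplit_append x t
          have hrun := runSplit_chain x t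
          have hemit : emitA (x :: t) false
              = fmtB x (runSplit x t).1 ++ commaTail (runSplit x t).2 := by
            conv_lhs => rw [hsplit]
            exact emitF x _ _ hrun (runSplit_boundary x t)
          rw [segsB, hemit]
          cases hp2 : (runSplit x t).2 with
          | nil =>
              rw [show segsB ([] : List Int) = [] from by rw [segsB], List.append_nil,
                show commaTail [] = [] from by simp [commaTail], List.append_nil]
              exact join_seg x _
          | cons w l =>
              have hlen2 : (w :: l).length ≤ N := by
                have hs := runSplit_snd_length x t
                rw [hp2] at hs
                simp only [List.length_cons] at h hs ⊢
                omega
              rw [join_append_ne_nil _ _ (by split <;> simp)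
                (segsB_ne_nil _ (List.cons_ne_nil _ _)), join_seg x _, ih _ hlen2,
                commaTail, if_neg (List.cons_ne_nil _ _)]
              simp

lemma loopA (args : List Int) :
    ∀ (cur pre : List Int) (out : List Char),
      args = pre ++ cur →
      ((pre = [] ∧ out = [] ∧ cur.length ≠ 2) ∨
        (out.getLast? = some ',' ∨ out.getLast? = some '-')) →
      (PySem.List.pyRange (pre.length) (PySem.List.len args) 1).foldl
          (solutionBody args (PySem.List.len args)) out
        = out ++ emitA cur (decide (out.getLast? = some '-')) := by
  intro cur
  induction cur with
  | nil =>
      intro pre out h _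
      have hn : PySem.List.len args = (pre.length : Int) := by
        simp [PySem.List.len_eq, h]
      rw [hn, PySem.List.pyRange_one_eq_nil (le_refl _)]
      simp [emitA]
  | cons x rest ih =>
      intro pre out h hinv
      have hlen : args.length = pre.length + rest.length + 1 := by simp [h]; omega
      have hn : PySem.List.len args = (args.length : Int) := by simp [PySem.List.len_eq]
      have hlt : (pre.length : Int) < PySem.List.len args := by
        rw [hn]; simp only [hlen]; push_cast; omega
      rw [PySem.List.pyRange_one_cons hlt, List.foldl_cons]
      have hx : PySem.List.pyGetD args (pre.length : Int) 0 = x := by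
        rw [h, PySem.List.pyGetD, PySem.List.pyGet?_append_length]; rfl
      have hneg : PySem.List.pyGet? out (-1) = out.getLast? :=
        PySem.List.pyGet?_neg_one out
      cases rest with
      | nil =>
          have hc1 : (pre.length : Int) = PySem.List.len args - 1 := by
            rw [hn]; simp only [hlen, List.length_nil]; push_cast; omega
          have hbody : solutionBody args (PySem.List.len args) out (pre.length : Int)
              = out ++ PySem.Int.toChars x := by
            simp only [solutionBody]
            rw [if_pos hc1, hx]
          rw [hbody]
          have hend : PySem.List.len args = ((pre.length : Int) + 1) := by
            rw [hn]; simp only [hlen, List.length_nil]; push_cast; omega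
          rw [hend, PySem.List.pyRange_one_eq_nil (le_refl _)]
          simp [emitA]
      | cons y t =>
          simp only [List.length_cons] at hlen
          have hy : PySem.List.pyGetD args ((pre.length : Int) + 1) 0 = y := by
            have e1 : ((pre.length : Int) + 1) = (((pre ++ [x]).length : Nat) : Int) := by
              simp
            have e2 : args = (pre ++ [x]) ++ y :: t := by simp [h]
            rw [e1, e2, PySem.List.pyGetD, PySem.List.pyGet?_append_length]; rfl
          have hc1 : ¬ ((pre.length : Int) = PySem.List.len args - 1) := by
            rw [hn]; simp only [hlen]; push_cast; omega
          have hrec : ∀ (out' : List Char),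
              (out'.getLast? = some ',' ∨ out'.getLast? = some '-') →
              (PySem.List.pyRange ((pre.length : Int) + 1) (PySem.List.len args) 1).foldl
                  (solutionBody args (PySem.List.len args)) out'
                = out' ++ emitA (y :: t) (decide (out'.getLast? = some '-')) := by
            intro out' hinv'
            have e1 : ((pre.length : Int) + 1) = (((pre ++ [x]).length : Nat) : Int) := by
              simp
            rw [e1]
            exact ih (pre ++ [x]) out' (by simp [h]) (Or.inr hinv')
          by_cases hne : y = x + 1
          · by_cases hdash : out.getLast? = some '-'
            · -- pass branch: out already ends with '-'
              have hout : out ≠ [] := by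
                intro hh; rw [hh] at hdash; simp at hdash
              have hbody : solutionBody args (PySem.List.len args) out (pre.length : Int)
                  = out := by
                simp only [solutionBody, hneg]
                rw [if_neg hc1, hx, hy,
                  if_neg (by simp [hne]),
                  if_pos ⟨List.length_pos_of_ne_nil hout, hdash⟩]
              rw [hbody, hrec out (Or.inr hdash)]
              simp [emitA, hne, hdash]
            · cases t with
              | nil =>
                  -- i == n-2 branch with out ending in ','
                  have hcomma : out.getLast? = some ',' := by
                    rcases hinv with ⟨_, _, hl⟩ | hr | hr
                    · simp at hl
                    · exact hr
                    · exact absurd hr hdash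
                  have hc2 : (pre.length : Int) = PySem.List.len args - 2 := by
                    rw [hn]; simp only [hlen, List.length_nil]; push_cast; omega
                  have hbody : solutionBody args (PySem.List.len args) out (pre.length : Int)
                      = out ++ PySem.Int.toChars x ++ [','] := by
                    simp only [solutionBody, hneg]
                    rw [if_neg hc1, hx, hy,
                      if_neg (by simp [hne]),
                      if_neg (by simp [hdash]),
                      if_pos hc2, hcomma]
                    simp
                  rw [hbody, hrec _ (Or.inl (by simp))]
                  simp [emitA, hne, hdash]
              | cons z t' =>
                  simp only [List.length_cons] at hlen
                  have hz : PySem.List.pyGetD args ((pre.length : Int) + 2) 0 = z := by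
                    have e1 : ((pre.length : Int) + 2)
                        = (((pre ++ [x, y]).length : Nat) : Int) := by
                      simp
                    have e2 : args = (pre ++ [x, y]) ++ z :: t' := by simp [h]
                    rw [e1, e2, PySem.List.pyGetD, PySem.List.pyGet?_append_length]; rfl
                  have hc2 : ¬ ((pre.length : Int) = PySem.List.len args - 2) := by
                    rw [hn]; simp only [hlen]; push_cast; omega
                  by_cases hz2 : z = x + 2
                  · have hbody : solutionBody args (PySem.List.len args) out (pre.length : Int)
                        = out ++ PySem.Int.toChars x ++ ['-'] := by
                      simp only [solutionBody, hneg]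
                      rw [if_neg hc1, hx, hy, hz,
                        if_neg (by simp [hne]),
                        if_neg (by simp [hdash]),
                        if_neg hc2, if_pos hz2]
                    rw [hbody, hrec _ (Or.inr (by simp [List.getLast?_append]))]
                    simp [emitA, hne, hdash, hz2, List.getLast?_append]
                  · have hbody : solutionBody args (PySem.List.len args) out (pre.length : Int)
                        = out ++ PySem.Int.toChars x ++ [','] := by
                      simp only [solutionBody, hneg]
                      rw [if_neg hc1, hx, hy, hz,
                        if_neg (by simp [hne]),
                        if_neg (by simp [hdash]),
                        if_neg hc2, if_neg hz2]
                    rw [hbody, hrec _ (Or.inl (by simp [List.getLast?_append]))]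
                    simp [emitA, hne, hdash, hz2, List.getLast?_append]
          · -- not consecutive: emit "str(x),"
            have hbody : solutionBody args (PySem.List.len args) out (pre.length : Int)
                = out ++ PySem.Int.toChars x ++ [','] := by
              simp only [solutionBody]
              rw [if_neg hc1, hx, hy, if_pos hne]
            rw [hbody, hrec _ (Or.inl (by simp [List.getLast?_append]))]
            simp [emitA, hne, List.getLast?_append]

lemma solution_eq_emit (args : List Int) :
    solution args = String.ofList (emitA args false) := by
  by_cases h2 : args.length = 2
  · obtain ⟨a, b, rfl⟩ := List.length_eq_two.mp h2
    by_cases hb : b = a + 1 <;>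
      simp [solution, emitA, PySem.List.len_eq, PySem.List.pyGetD_ofNat', hb]
  · by_cases h3 : args.length = 3
    · obtain ⟨a, b, c, rfl⟩ := List.length_eq_three.mp h3
      by_cases hb : b = a + 1
      · subst hb
        by_cases hc : c = a + 1 + 1
        · subst hc
          simp [solution, emitA, PySem.List.len_eq, PySem.List.pyGetD_ofNat']
        · have hc' : ¬ c = a + 2 := by omega
          simp [solution, emitA, PySem.List.len_eq, PySem.List.pyGetD_ofNat',
            hc, hc']
      · by_cases hc : c = b + 1 <;>
          simp [solution, emitA, PySem.List.len_eq, PySem.List.pyGetD_ofNat',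
            hb, hc]
    · have hloop := loopA args args [] [] rfl (Or.inl ⟨rfl, rfl, h2⟩)
      simp only [List.length_nil, Nat.cast_zero, List.nil_append] at hloop
      have hn2 : ¬ (PySem.List.len args = 2) := by
        simp only [PySem.List.len_eq]; exact_mod_cast fun hh => h2 (by exact_mod_cast hh)
      have hn3 : ¬ (PySem.List.len args = 3) := by
        simp only [PySem.List.len_eq]; exact_mod_cast fun hh => h3 (by exact_mod_cast hh)
      rw [solution]
      simp only [hn2, hn3, if_false]
      rw [hloop]
      simp

-- ===== VERDICT (by name: the statement is the Claim_ definition above) =====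
theorem solution_spec : Claim_equal_solution := by
  intro args _
  unfold Spec_solution solution_alt
  rw [solution_eq_emit, join_segsB args.length args (le_refl _)]
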